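-- pv_equiv track=rewrite | github.com/Axionis47/ai-transformation-agent | orchestrator/matching_layer.py | _industries_related
-- ===== SOURCE A (Python) =====
-- _INDUSTRY_CLUSTERS = [
--     {"logistics", "manufacturing", "construction", "energy"},
--     {"financial_services", "fintech", "insurance"},
--     {"healthcare", "healthtech"},
--     {"retail", "ecommerce"},
--     {"professional_services", "real_estate", "proptech"},
-- ]
--
-- def _industries_related(a: str, b: str) -> bool:
--     """Check if two industry strings belong to the same cluster.
--
--     Handles exact cluster members and compound labels like 'B2B logistics SaaS'.
--     """
--     a_l, b_l = a.lower(), b.lower()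
--     for cluster in _INDUSTRY_CLUSTERS:
--         a_in = any(c in a_l or a_l in c for c in cluster)
--         b_in = any(c in b_l or b_l in c for c in cluster)
--         if a_in and b_in:
--             return True
--     return False
-- ===== SOURCE B (Python) =====
-- _INDUSTRY_CLUSTERS = [
--     {"logistics", "manufacturing", "construction", "energy"},
--     {"financial_services", "fintech", "insurance"},
--     {"healthcare", "healthtech"},
--     {"retail", "ecommerce"},
--     {"professional_services", "real_estate", "proptech"},
-- ]
--
-- # Precomputed once: the within-cluster relation as a flat table of ordered
-- # label pairs.  Two labels are related iff some pair (c1, c2) of this table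
-- # has c1 matching the first label and c2 matching the second.
-- _RELATED_PAIRS = [
--     (c1, c2)
--     for cluster in _INDUSTRY_CLUSTERS
--     for c1 in cluster
--     for c2 in cluster
-- ]
--
--
-- def _matches(label, c):
--     return c in label or label in c
--
--
-- def _industries_related(a, b):
--     a_l, b_l = a.lower(), b.lower()
--     return any(_matches(a_l, c1) and _matches(b_l, c2)
--                for c1, c2 in _RELATED_PAIRS)
-- ===== Notes on version B (the rewrite author's own statement) =====
-- stated objective: alternative
-- what changed: Eliminates the nested per-cluster structure: the cluster list is flattened once at module load into a flat relation table of within-cluster label pairs, and relatedness is decided by a single linear scan over that pair table instead of A's loop over clusters with two inner any-scans per cluster.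
import Mathlib
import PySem

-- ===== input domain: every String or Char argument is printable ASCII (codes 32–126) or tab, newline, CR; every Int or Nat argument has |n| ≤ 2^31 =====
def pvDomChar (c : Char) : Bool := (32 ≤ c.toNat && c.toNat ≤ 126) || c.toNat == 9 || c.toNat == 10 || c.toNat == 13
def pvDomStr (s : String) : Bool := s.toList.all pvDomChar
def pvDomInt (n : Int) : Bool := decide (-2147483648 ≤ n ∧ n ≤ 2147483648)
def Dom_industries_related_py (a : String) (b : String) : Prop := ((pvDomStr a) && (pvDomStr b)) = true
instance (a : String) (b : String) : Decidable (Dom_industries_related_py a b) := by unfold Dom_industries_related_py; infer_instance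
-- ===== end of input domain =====

-- B flattens the nested cluster structure into a precomputed flat table of within-cluster
-- label pairs and decides by one linear scan over that table (objective: alternative).

-- ===== PORT A =====
-- _INDUSTRY_CLUSTERS: each Python set of strings as the list of its distinct elements
def pvClusters : List (List String) :=
  [["logistics", "manufacturing", "construction", "energy"],
   ["financial_services", "fintech", "insurance"],
   ["healthcare", "healthtech"],
   ["retail", "ecommerce"],
   ["professional_services", "real_estate", "proptech"]]

-- any(c in x or x in c for c in cluster)
def pvHit (x : String) (cluster : List String) : Bool :=
  cluster.any (fun c => PySem.Str.isIn c x || PySem.Str.isIn x c)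

-- the for-loop over _INDUSTRY_CLUSTERS with early 'return True'
def pvLoopA (aL : String) (bL : String) : List (List String) → Bool
  | [] => false
  | cluster :: rest =>
      let aIn := pvHit aL cluster
      let bIn := pvHit bL cluster
      if aIn && bIn then true else pvLoopA aL bL rest

def industries_related_py (a : String) (b : String) : Bool :=
  pvLoopA (PySem.Str.lower a) (PySem.Str.lower b) pvClusters

-- ===== PORT B =====
-- _RELATED_PAIRS: the flat comprehension over cluster, c1, c2
def pvRelatedPairs : List (String × String) :=
  pvClusters.flatMap (fun cluster =>
    cluster.flatMap (fun c1 => cluster.map (fun c2 => (c1, c2))))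

-- _matches(label, c): c in label or label in c
def pvMatches (label : String) (c : String) : Bool :=
  PySem.Str.isIn c label || PySem.Str.isIn label c

def industries_related_py_alt (a : String) (b : String) : Bool :=
  let aL := PySem.Str.lower a
  let bL := PySem.Str.lower b
  pvRelatedPairs.any (fun p => pvMatches aL p.1 && pvMatches bL p.2)

-- ===== PRECONDITION & SPEC =====
def Spec_industries_related_py (a : String) (b : String) (out : Bool) : Prop := out = industries_related_py_alt a b
instance (a : String) (b : String) (out : Bool) : Decidable (Spec_industries_related_py a b out) := by unfold Spec_industries_related_py; infer_instance

-- ===== CLAIM (what is proved, stated in full; the proofs are below) =====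
def Claim_equal_industries_related_py : Prop := ∀ (a : String) (b : String), Dom_industries_related_py a b → Spec_industries_related_py a b (industries_related_py a b)

-- ===== LEMMAS AND PROOFS =====

-- scanning one cluster's block of the pair table equals the product of the two per-cluster hits
theorem pairs_block_eq (aL bL : String) (cl : List String) :
    ((cl.flatMap (fun c1 => cl.map (fun c2 => (c1, c2)))).any
        (fun p => pvMatches aL p.1 && pvMatches bL p.2))
      = (pvHit aL cl && pvHit bL cl) := by
  rw [List.any_flatMap]
  simp only [List.any_map, Function.comp_def]
  have hin : ∀ c1, ((cl.any fun c2 => pvMatches aL c1 && pvMatches bL c2)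
      = (pvMatches aL c1 && cl.any fun c2 => pvMatches bL c2)) := by
    intro c1; cases hm : pvMatches aL c1 <;> simp [hm]
  simp only [hin]
  have hhit : ∀ x, pvHit x cl = cl.any fun c => pvMatches x c := fun _ => rfl
  cases hq : cl.any fun c2 => pvMatches bL c2 <;> simp [hq, hhit]

-- A's early-return loop over clusters equals B's single scan of the flattened pair table
theorem loop_eq_pairs (aL bL : String) (cls : List (List String)) :
    pvLoopA aL bL cls
      = (cls.flatMap (fun cluster =>
          cluster.flatMap (fun c1 => cluster.map (fun c2 => (c1, c2))))).any
          (fun p => pvMatches aL p.1 && pvMatches bL p.2) := by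
  induction cls with
  | nil => rfl
  | cons cl rest ih =>
      simp only [pvLoopA, List.flatMap_cons, List.any_append, pairs_block_eq, ih]
      by_cases h : (pvHit aL cl && pvHit bL cl) = true <;> simp [h]

-- ===== VERDICT (by name: the statement is the Claim_ definition above) =====
theorem industries_related_py_spec : Claim_equal_industries_related_py := by
  intro a b _
  unfold Spec_industries_related_py industries_related_py industries_related_py_alt pvRelatedPairs
  exact loop_eq_pairs (PySem.Str.lower a) (PySem.Str.lower b) pvClusters
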